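-- pv_equiv track=rewrite | github.com/hyunspace/TIL-APS | 백준/브론즈2/2231_분해합.py | find_m
-- ===== SOURCE A (Python) =====
-- def find_m(n):
--     for i in range(1, n):
--         m = i
--         str_i = str(i)
--         for j in str_i:
--             m += int(j)
--         if m == n:
--             return i
--     return 0
-- ===== SOURCE B (Python) =====
-- def find_m(n):
--     # digit sum of i < n is at most 9 * len(str(n)), so any solution lies in [n - 9*len(str(n)), n)
--     lo = max(1, n - 9 * len(str(n)))
--     for i in range(lo, n):
--         if i + sum(int(d) for d in str(i)) == n:
--             return i
--     return 0
-- ===== Notes on version B (the rewrite author's own statement) =====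
-- stated objective: faster
-- what changed: Instead of scanning every candidate i from the bottom up, B scans only the candidates within nine-per-digit-of-n below n, since the digit sum of any smaller candidate cannot exceed that bound; asymptotically polylog instead of near-linear.
import Mathlib
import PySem

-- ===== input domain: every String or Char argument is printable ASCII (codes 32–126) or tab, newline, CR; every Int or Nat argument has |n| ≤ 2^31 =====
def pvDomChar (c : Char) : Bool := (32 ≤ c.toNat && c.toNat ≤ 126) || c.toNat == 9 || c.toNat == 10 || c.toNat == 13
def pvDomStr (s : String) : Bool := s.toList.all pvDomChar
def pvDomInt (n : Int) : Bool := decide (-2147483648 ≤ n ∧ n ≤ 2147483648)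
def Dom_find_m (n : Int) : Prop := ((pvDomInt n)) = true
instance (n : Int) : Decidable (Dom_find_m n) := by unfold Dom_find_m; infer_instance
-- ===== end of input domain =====

-- B changes the scan range: only i in [max(1, n - 9*len(str(n))), n) can satisfy i + digitsum(i) = n.

-- ===== PORT A =====
-- int(j) on a single char: PySem.Int.ofChars? [j]; getD 0 never fires since j is a digit of str(i), i ≥ 1
def findLoopA (n : Int) : List Int → Int
  | [] => 0
  | i :: rest =>
      -- m = i; for j in str(i): m += int(j)
      let m := (PySem.Int.toChars i).foldl (fun m j => m + (PySem.Int.ofChars? [j]).getD 0) i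
      if m = n then i else findLoopA n rest

def find_m (n : Int) : Int := findLoopA n (PySem.List.pyRange 1 n 1)

-- ===== PORT B =====
-- sum(int(d) for d in str(i))
def digitSumB (i : Int) : Int :=
  ((PySem.Int.toChars i).map (fun d => (PySem.Int.ofChars? [d]).getD 0)).sum

def findLoopB (n : Int) : List Int → Int
  | [] => 0
  | i :: rest => if i + digitSumB i = n then i else findLoopB n rest

def find_m_alt (n : Int) : Int :=
  let lo := max 1 (n - 9 * PySem.Str.len (PySem.Int.toStr n))
  findLoopB n (PySem.List.pyRange lo n 1)

-- ===== PRECONDITION & SPEC =====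
def Spec_find_m (n : Int) (out : Int) : Prop := out = find_m_alt n
instance (n : Int) (out : Int) : Decidable (Spec_find_m n out) := by unfold Spec_find_m; infer_instance

-- ===== CLAIM (what is proved, stated in full; the proofs are below) =====
def Claim_equal_find_m : Prop := ∀ (n : Int), Dom_find_m n → Spec_find_m n (find_m n)

-- ===== LEMMAS AND PROOFS =====

-- structural characterisation of Nat.toDigits 10
def myChars (m : Nat) : List Char :=
  if h : m < 10 then [Nat.digitChar m]
  else myChars (m / 10) ++ [Nat.digitChar (m % 10)]
  decreasing_by exact Nat.div_lt_self (by omega) (by omega)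

lemma toDigitsCore_eq_myChars : ∀ (f m : Nat) (acc : List Char), m < f →
    Nat.toDigitsCore 10 f m acc = myChars m ++ acc := by
  intro f
  induction f with
  | zero => omega
  | succ f ih =>
    intro m acc hm
    rw [Nat.toDigitsCore]
    by_cases h : m / 10 = 0
    · rw [myChars]
      have h10 : m < 10 := by omega
      simp [h, h10, Nat.mod_eq_of_lt h10]
    · have h10 : ¬ m < 10 := by omega
      rw [myChars]
      simp only [h, h10, if_false, dif_neg h10]
      rw [ih (m / 10) _ (by omega)]
      simp

lemma toDigits_eq_myChars (m : Nat) : Nat.toDigits 10 m = myChars m := by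
  rw [Nat.toDigits, toDigitsCore_eq_myChars (m + 1) m [] (by omega), List.append_nil]

lemma toChars_pos (i : Int) (h : 0 < i) : PySem.Int.toChars i = myChars i.toNat := by
  rw [PySem.Int.toChars, if_neg (by omega), toDigits_eq_myChars]

def pvVal (c : Char) : Int := (PySem.Int.ofChars? [c]).getD 0

lemma pvVal_digitChar (d : Nat) (hd : d < 10) : pvVal (Nat.digitChar d) = (d : Int) := by
  interval_cases d <;> decide

lemma digitSum_myChars_bound (m : Nat) :
    ((myChars m).map pvVal).sum ≤ 9 * (myChars m).length := by
  induction m using Nat.strong_induction_on with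
  | _ m ih =>
    rw [myChars]
    by_cases h : m < 10
    · simp [h, pvVal_digitChar m h]; omega
    · simp only [h, dif_neg h, List.map_append, List.sum_append, List.length_append]
      have h1 := ih (m / 10) (Nat.div_lt_self (by omega) (by omega))
      have h2 : pvVal (Nat.digitChar (m % 10)) = ((m % 10 : Nat) : Int) :=
        pvVal_digitChar _ (Nat.mod_lt _ (by omega))
      simp [h2]
      have : ((m % 10 : Nat) : Int) ≤ 9 := by omega
      omega

lemma myChars_length_mono (i n : Nat) (h : i ≤ n) :
    (myChars i).length ≤ (myChars n).length := by
  induction n using Nat.strong_induction_on generalizing i with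
  | _ n ih =>
    by_cases hi : i < 10
    · rw [myChars, dif_pos hi]
      rw [myChars]
      by_cases hn : n < 10
      · simp [hn]
      · simp [hn]
    · have hn : ¬ n < 10 := by omega
      have hii : myChars i = myChars (i / 10) ++ [Nat.digitChar (i % 10)] := by
        rw [myChars, dif_neg hi]
      have hnn : myChars n = myChars (n / 10) ++ [Nat.digitChar (n % 10)] := by
        rw [myChars, dif_neg hn]
      rw [hii, hnn]
      simp only [List.length_append, List.length_singleton]
      have := ih (n / 10) (Nat.div_lt_self (by omega) (by omega)) (i / 10)
        (Nat.div_le_div_right h)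
      omega

lemma digitSumB_bound (i n : Int) (hi : 0 < i) (hin : i ≤ n) :
    digitSumB i ≤ 9 * ((PySem.Int.toChars n).length : Int) := by
  have hn : 0 < n := by omega
  rw [digitSumB, toChars_pos i hi, toChars_pos n hn]
  have h1 : ((myChars i.toNat).map pvVal).sum ≤ 9 * (myChars i.toNat).length :=
    digitSum_myChars_bound i.toNat
  have h2 : (myChars i.toNat).length ≤ (myChars n.toNat).length :=
    myChars_length_mono _ _ (by omega)
  have : ((myChars i.toNat).map (fun d => (PySem.Int.ofChars? [d]).getD 0)).sum
      = ((myChars i.toNat).map pvVal).sum := by rfl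
  rw [this]
  omega

lemma loopA_eq_loopB (n : Int) (l : List Int) : findLoopA n l = findLoopB n l := by
  induction l with
  | nil => rfl
  | cons i rest ih =>
    rw [findLoopA, findLoopB]
    have : (PySem.Int.toChars i).foldl (fun m j => m + (PySem.Int.ofChars? [j]).getD 0) i
        = i + digitSumB i := by
      rw [PySem.List.foldl_add, digitSumB]
    rw [this, ih]

lemma loopB_append_fail (n : Int) (xs ys : List Int)
    (h : ∀ i ∈ xs, i + digitSumB i ≠ n) :
    findLoopB n (xs ++ ys) = findLoopB n ys := by
  induction xs with
  | nil => rfl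
  | cons x xs ih =>
    rw [List.cons_append, findLoopB, if_neg (h x (by simp)), ih]
    intro i hi; exact h i (by simp [hi])

lemma len_toStr (n : Int) :
    PySem.Str.len (PySem.Int.toStr n) = ((PySem.Int.toChars n).length : Int) := by
  simp [PySem.Str.len_eq, PySem.Int.toList_toStr]

theorem find_m_eq_alt (n : Int) : find_m n = find_m_alt n := by
  rw [find_m, find_m_alt, loopA_eq_loopB]
  set L : Int := PySem.Str.len (PySem.Int.toStr n) with hL
  set lo : Int := max 1 (n - 9 * L) with hlo
  by_cases hn : n ≤ lo
  · -- both ranges empty or equal start point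
    by_cases hn1 : n ≤ 1
    · rw [PySem.List.pyRange_one_eq_nil (by omega), PySem.List.pyRange_one_eq_nil (by omega)]
    · -- 1 < n and n ≤ lo: then lo = n - 9L ≥ n impossible unless 9L ≤ 0; L ≥ 1, so lo = 1, so n ≤ 1; contradiction unless...
      have hLpos : (1:Int) ≤ L := by
        rw [hL, len_toStr]
        have : (PySem.Int.toChars n).length ≠ 0 := by
          rw [PySem.Int.toChars]
          split
          · simp
          · rw [toDigits_eq_myChars, myChars]; split <;> simp
        omega
      have : lo = 1 := by rw [hlo]; omega
      omega
  · rw [not_le] at hn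
    have h1 : (1:Int) ≤ lo := by rw [hlo]; omega
    rw [PySem.List.pyRange_one_append 1 lo n h1 (by omega)]
    apply loopB_append_fail
    intro i hi
    rw [PySem.List.mem_pyRange_one] at hi
    have hilo : i < lo := hi.2
    have hlo2 : lo = n - 9 * L ∨ lo = 1 := by rw [hlo]; omega
    rcases hlo2 with h | h
    · have hb : digitSumB i ≤ 9 * ((PySem.Int.toChars n).length : Int) :=
        digitSumB_bound i n (by omega) (by omega)
      rw [hL, len_toStr] at h
      omega
    · omega

-- ===== VERDICT (by name: the statement is the Claim_ definition above) =====
theorem find_m_spec : Claim_equal_find_m := by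
  intro n _
  exact find_m_eq_alt n
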